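-- pv_equiv track=rewrite | github.com/keithscubemate/sample_dump_processor | proc.py | get_spacings
-- ===== SOURCE A (Python) =====
-- def get_spacings(spacings):
--     rv = []
--
--     last = 0
--     final = 0
--
--     for i, c in enumerate(spacings):
--         if c == ' ':
--             rv.append((last, i))
--             last = i
--         final = i
--
--     rv.append((last, final))
--
--     return rv
-- ===== SOURCE B (Python) =====
-- def get_spacings(spacings):
--     positions = [i for i, c in enumerate(spacings) if c == ' ']
--     final = len(spacings) - 1 if spacings else 0
--     return list(zip([0] + positions, positions + [final]))
-- ===== Notes on version B (the rewrite author's own statement) =====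
-- stated objective: simpler
-- what changed: Replaces the running last/final accumulator loop with collecting space indices once and pairing consecutive boundary points via zip([0]+positions, positions+[final]).
import Mathlib
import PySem

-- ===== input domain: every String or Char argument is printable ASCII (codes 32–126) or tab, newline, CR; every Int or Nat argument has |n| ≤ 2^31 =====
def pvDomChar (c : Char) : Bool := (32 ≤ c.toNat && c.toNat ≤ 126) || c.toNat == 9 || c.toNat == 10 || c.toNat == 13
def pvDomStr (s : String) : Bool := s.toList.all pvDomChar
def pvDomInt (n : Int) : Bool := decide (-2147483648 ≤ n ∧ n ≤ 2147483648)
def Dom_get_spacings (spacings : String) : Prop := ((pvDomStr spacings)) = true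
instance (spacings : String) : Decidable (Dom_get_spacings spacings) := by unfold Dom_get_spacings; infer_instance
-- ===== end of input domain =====

-- B replaces A's running last/final accumulator loop by collecting the space
-- indices once and zipping consecutive boundary points (objective: simpler).

-- ===== PORT A =====
-- the loop body: rv.append + last update on a space, final = i every iteration
def pvStepA (acc : List (Int × Int) × Int × Int) (ic : Int × Char) :
    List (Int × Int) × Int × Int :=
  if ic.2 = ' ' then (acc.1 ++ [(acc.2.1, ic.1)], ic.1, ic.1)
  else (acc.1, acc.2.1, ic.1)

def get_spacings (spacings : String) : List (Int × Int) :=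
  let st := (PySem.List.enumerate spacings.toList).foldl pvStepA ([], 0, 0)
  st.1 ++ [(st.2.1, st.2.2)]

-- ===== PORT B =====
def get_spacings_alt (spacings : String) : List (Int × Int) :=
  let positions := ((PySem.List.enumerate spacings.toList).filter
    (fun ic => ic.2 = ' ')).map (fun ic => ic.1)
  let final : Int := if spacings.toList ≠ [] then (spacings.toList.length : Int) - 1 else 0
  List.zip ((0 : Int) :: positions) (positions ++ [final])

-- ===== PRECONDITION & SPEC =====
def Spec_get_spacings (spacings : String) (out : List (Int × Int)) : Prop := out = get_spacings_alt spacings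
instance (spacings : String) (out : List (Int × Int)) : Decidable (Spec_get_spacings spacings out) := by unfold Spec_get_spacings; infer_instance

-- ===== CLAIM (what is proved, stated in full; the proofs are below) =====
def Claim_equal_get_spacings : Prop := ∀ (spacings : String), Dom_get_spacings spacings → Spec_get_spacings spacings (get_spacings spacings)

-- ===== LEMMAS AND PROOFS =====

-- A's fold, characterised: the appended pairs are the zip of consecutive
-- boundaries, last = last space position, final = last index seen.
theorem pvFoldA (l : List (Int × Char)) (rv : List (Int × Int)) (last f0 : Int) :
    l.foldl pvStepA (rv, last, f0) =
      (rv ++ List.zip (last :: (l.filter (fun ic => ic.2 = ' ')).map (fun ic => ic.1))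
                      ((l.filter (fun ic => ic.2 = ' ')).map (fun ic => ic.1)),
       ((l.filter (fun ic => ic.2 = ' ')).map (fun ic => ic.1)).getLastD last,
       (l.map (fun ic => ic.1)).getLastD f0) := by
  induction l generalizing rv last f0 with
  | nil => simp
  | cons hd tl ih =>
    by_cases h : hd.2 = ' '
    · simp only [List.foldl_cons, pvStepA, h, if_pos, List.filter_cons, decide_true,
        List.map_cons, ih, List.getLastD_cons, List.zip_cons_cons,
        List.append_assoc, List.singleton_append]
    · simp only [List.foldl_cons, pvStepA, h, if_false, List.filter_cons, decide_false,
        List.map_cons, ih, List.getLastD_cons]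
      simp

theorem pvZipSplit (P : List Int) (a b : Int) :
    List.zip (a :: P) (P ++ [b]) = List.zip (a :: P) P ++ [(P.getLastD a, b)] := by
  induction P generalizing a with
  | nil => simp
  | cons p t ih =>
    simp only [List.cons_append, List.zip_cons_cons, ih p, List.getLastD_cons]

-- the last index of enumerate: length - 1 for a nonempty list, default otherwise
theorem pvLastIdx (xs : List Char) (d : Int) :
    ((PySem.List.enumerate xs).map (fun ic => ic.1)).getLastD d =
      if xs ≠ [] then (xs.length : Int) - 1 else d := by
  rw [PySem.List.map_fst_enumerate]
  rcases eq_or_ne xs [] with rfl | h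
  · simp [PySem.List.pyRange_one_eq_nil]
  · have hn : 0 < xs.length := List.length_pos_iff.mpr h
    have hn' : (1 : Int) ≤ (xs.length : Int) := by exact_mod_cast hn
    have e1 : (0 : Int) + xs.length = (xs.length : Int) := by omega
    rw [e1, PySem.List.pyRange_one_append 0 ((xs.length : Int) - 1) xs.length
          (by omega) (by omega)]
    rw [PySem.List.pyRange_one_cons (a := (xs.length : Int) - 1)
          (b := (xs.length : Int)) (by omega)]
    rw [show ((xs.length : Int) - 1 + 1) = (xs.length : Int) by omega]
    rw [PySem.List.pyRange_one_eq_nil (a := (xs.length : Int))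
          (b := (xs.length : Int)) (by omega)]
    simp [h]

-- ===== VERDICT (by name: the statement is the Claim_ definition above) =====
theorem get_spacings_spec : Claim_equal_get_spacings := by
  intro s _
  unfold Spec_get_spacings get_spacings get_spacings_alt
  rw [pvFoldA, pvZipSplit]
  simp only [List.nil_append]
  rw [pvLastIdx]
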